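-- pv_equiv track=rewrite | github.com/dgiesy/CodeAdvent2017 | aocDay6/com/whatever/memoryReallocation.py | oneCycle
-- ===== SOURCE A (Python) =====
-- def oneCycle(startingList):
--     endingList = startingList[:]
--     listSize = len(startingList)
--     maxValue = max(startingList)
--     runningIndex = startingList.index(maxValue)
--     endingList[runningIndex] = 0
--     while maxValue > 0:
--         runningIndex += 1
--         workingIndex = runningIndex % listSize
--         endingList[workingIndex] += 1
--         maxValue -= 1
--     return endingList
-- ===== SOURCE B (Python) =====
-- def oneCycle(startingList):
--     n = len(startingList)
--     m = max(startingList)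
--     i = startingList.index(m)
--     q, r = divmod(max(m, 0), n)
--     return [(0 if k == i else v) + q + (1 if (k - i - 1) % n < r else 0)
--             for k, v in enumerate(startingList)]
-- ===== Notes on version B (the rewrite author's own statement) =====
-- stated objective: alternative
-- what changed: B replaces A's one-block-at-a-time redistribution while-loop (one iteration per block of the max value) by a divmod closed form: each bank gets the quotient plus one extra block iff its cyclic distance from the max index is below the remainder, built in a single comprehension.
import Mathlib
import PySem

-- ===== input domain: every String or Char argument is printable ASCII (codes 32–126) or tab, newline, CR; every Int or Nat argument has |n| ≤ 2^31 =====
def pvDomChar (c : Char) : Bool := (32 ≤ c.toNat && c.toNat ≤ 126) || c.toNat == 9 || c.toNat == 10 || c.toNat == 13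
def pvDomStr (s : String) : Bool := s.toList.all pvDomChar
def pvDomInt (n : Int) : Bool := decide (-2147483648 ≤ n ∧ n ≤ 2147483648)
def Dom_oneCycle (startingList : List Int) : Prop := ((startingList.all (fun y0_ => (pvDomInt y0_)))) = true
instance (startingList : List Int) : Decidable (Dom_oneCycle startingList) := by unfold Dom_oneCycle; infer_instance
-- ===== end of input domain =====

-- B replaces A's one-block-at-a-time redistribution loop by a divmod closed form built in one pass.
-- Neither program mutates its argument (A copies it first); equivalence is about the return value.

-- ===== PORT A =====
-- 'while maxValue > 0: runningIndex += 1; endingList[runningIndex % listSize] += 1; maxValue -= 1'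
-- ported as structural recursion with one step per loop iteration (maxValue.toNat iterations).
def oneCycleLoop (endingList : List Int) (runningIndex listSize : Int) : Nat → List Int
  | 0 => endingList
  | t + 1 =>
    let ri := runningIndex + 1
    let wi := PySem.Int.mod ri listSize
    oneCycleLoop (PySem.List.pySetD endingList wi (PySem.List.pyGetD endingList wi 0 + 1)) ri listSize t

def oneCycle (startingList : List Int) : List Int :=
  match PySem.List.max? startingList (fun x => x) with
  | none => []           -- unreachable under Pre_: max([]) raises ValueError
  | some maxValue =>
    match PySem.List.index? startingList maxValue with
    | none => []         -- unreachable: the max is a member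
    | some runningIndex =>
      let endingList := PySem.List.pySetD startingList (runningIndex : Int) 0
      oneCycleLoop endingList (runningIndex : Int) (startingList.length : Int) maxValue.toNat

-- ===== PORT B =====
def oneCycle_alt (startingList : List Int) : List Int :=
  let n : Int := (startingList.length : Int)
  match PySem.List.max? startingList (fun x => x) with
  | none => []           -- unreachable under Pre_: max([]) raises ValueError
  | some m =>
    match PySem.List.index? startingList m with
    | none => []         -- unreachable: the max is a member
    | some i =>
      let q := PySem.Int.floordiv (max m 0) n
      let r := PySem.Int.mod (max m 0) n
      (PySem.List.enumerate startingList 0).map (fun kv =>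
        (if kv.1 = (i : Int) then 0 else kv.2) + q
          + (if PySem.Int.mod (kv.1 - (i : Int) - 1) n < r then 1 else 0))

-- ===== PRECONDITION & SPEC =====
-- Pre_ excludes only the empty list, on which A's max(startingList) raises ValueError (B raises too).
def Pre_oneCycle (startingList : List Int) : Prop := startingList ≠ []
instance (startingList : List Int) : Decidable (Pre_oneCycle startingList) := by unfold Pre_oneCycle; infer_instance
def pvWitness_oneCycle : List Int := [0, 2, 7, 0]

def Spec_oneCycle (startingList : List Int) (out : List Int) : Prop := out = oneCycle_alt startingList
instance (startingList : List Int) (out : List Int) : Decidable (Spec_oneCycle startingList out) := by unfold Spec_oneCycle; infer_instance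

-- ===== CLAIM (what is proved, stated in full; the proofs are below) =====
def Claim_equal_oneCycle : Prop := ∀ (startingList : List Int), Dom_oneCycle startingList → Pre_oneCycle startingList → Spec_oneCycle startingList (oneCycle startingList)

-- ===== LEMMAS AND PROOFS =====

-- number of the first t loop iterations (current index j) that land on slot k
def cntHits (j n k : Int) : Nat → Int
  | 0 => 0
  | t + 1 => (if PySem.Int.mod (j + 1) n = k then 1 else 0) + cntHits (j + 1) n k t

theorem oneCycleLoop_length (ri ls : Int) (t : Nat) (L : List Int) :
    (oneCycleLoop L ri ls t).length = L.length := by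
  induction t generalizing L ri with
  | zero => rfl
  | succ t ih => simp [oneCycleLoop, ih]

-- each slot of the loop's result is its start value plus the number of iterations landing on it
theorem oneCycleLoop_getElem (ls : Int) (t : Nat) (L : List Int) (ri : Int)
    (hls : ls = (L.length : Int)) (hpos : L ≠ []) (k : Nat) (hk : k < L.length)
    (hlen : k < (oneCycleLoop L ri ls t).length) :
    (oneCycleLoop L ri ls t)[k] = L[k] + cntHits ri ls (k : Int) t := by
  induction t generalizing L ri with
  | zero => simp [oneCycleLoop, cntHits]
  | succ t ih =>
    have hn : 0 < ls := by
      have : L.length ≠ 0 := by simpa [List.length_eq_zero_iff] using hpos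
      omega
    set wi := PySem.Int.mod (ri + 1) ls with hwi
    have hwi0 : 0 ≤ wi := PySem.Int.mod_nonneg _ hn
    have hwilt : wi < ls := PySem.Int.mod_lt _ hn
    have hwn : wi.toNat < L.length := by omega
    have hset : PySem.List.pySetD L wi (PySem.List.pyGetD L wi 0 + 1)
        = L.set wi.toNat (L[wi.toNat] + 1) := by
      rw [PySem.List.pySetD_of_nonneg _ _ hwi0,
        PySem.List.pyGetD_eq_getElem _ _ hwi0 (by omega)]
    have hL' : (L.set wi.toNat (L[wi.toNat] + 1)).length = L.length := by simp
    have hne' : L.set wi.toNat (L[wi.toNat] + 1) ≠ [] := by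
      intro h; rw [← List.length_eq_zero_iff, hL'] at h; omega
    have hgoal : (oneCycleLoop L ri ls (t+1)) = oneCycleLoop (L.set wi.toNat (L[wi.toNat] + 1)) (ri+1) ls t := by
      rw [oneCycleLoop]; rw [hset]
    simp only [hgoal] at hlen ⊢
    rw [ih (L.set wi.toNat (L[wi.toNat] + 1)) (ri+1) (by rw [hL', hls]) hne' (by omega) hlen]
    rw [cntHits]
    rw [List.getElem_set]
    by_cases hkw : wi.toNat = k
    · have : PySem.Int.mod (ri + 1) ls = (k : Int) := by rw [← hwi]; omega
      simp [hkw, this]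
      ring
    · have : PySem.Int.mod (ri + 1) ls ≠ (k : Int) := by rw [← hwi]; omega
      simp [hkw, this]

-- closed form: of t consecutive round-robin drops starting after index j, slot k gets
-- t // n plus one more iff its cyclic distance from j+1 is below t % n
theorem cntHits_closed (n k : Int) (hn : 0 < n) (hk0 : 0 ≤ k) (hkn : k < n) (t : Nat) (j : Int) :
    cntHits j n k t =
      PySem.Int.floordiv (t : Int) n
        + (if PySem.Int.mod (k - j - 1) n < PySem.Int.mod (t : Int) n then 1 else 0) := by
  induction t generalizing j with
  | zero =>
    rw [cntHits, PySem.Int.floordiv_eq_ediv_of_pos hn, PySem.Int.mod_eq_emod_of_pos hn,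
      PySem.Int.mod_eq_emod_of_pos hn]
    have h1 : 0 ≤ (k - j - 1) % n := Int.emod_nonneg _ (by omega)
    simp
    omega
  | succ t ih =>
    rw [cntHits, ih (j + 1)]
    rw [PySem.Int.floordiv_eq_ediv_of_pos hn, PySem.Int.floordiv_eq_ediv_of_pos hn]
    simp only [PySem.Int.mod_eq_emod_of_pos hn]
    set d := (k - j - 1) % n with hd
    have hd0 : 0 ≤ d := Int.emod_nonneg _ (by omega)
    have hdn : d < n := Int.emod_lt_of_pos _ hn
    have hcond : ((j + 1) % n = k) ↔ d = 0 := by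
      rw [show ((j + 1) % n = k) ↔ ((j + 1) % n = k % n) by
            rw [Int.emod_eq_of_lt hk0 hkn]]
      rw [Int.emod_eq_emod_iff_emod_sub_eq_zero, hd]
      constructor
      · intro h
        have : n ∣ (j + 1 - k) := Int.dvd_of_emod_eq_zero h
        have : n ∣ (k - j - 1) := by
          have := this.neg_right
          simpa [show -(j+1-k) = k - j - 1 by ring] using this
        exact Int.emod_eq_zero_of_dvd this
      · intro h
        have : n ∣ (k - j - 1) := Int.dvd_of_emod_eq_zero h
        have : n ∣ (j + 1 - k) := by
          have := this.neg_right
          simpa [show -(k-j-1) = j + 1 - k by ring] using this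
        exact Int.emod_eq_zero_of_dvd this
    have hshift : (k - (j + 1) - 1) % n = (d - 1) % n := by
      have h1 : d % n = d := Int.emod_eq_of_lt hd0 hdn
      conv_lhs => rw [show k - (j + 1) - 1 = (k - j - 1) - 1 by ring]
      rw [Int.sub_emod, ← hd]
      conv_rhs => rw [Int.sub_emod, h1]
    have hdm1 : (d - 1) % n = if d = 0 then n - 1 else d - 1 := by
      by_cases h : d = 0
      · simp [h]
        rw [show (-1 : Int) = (n - 1) + n * (-1) by ring, Int.add_mul_emod_self_left,
          Int.emod_eq_of_lt (by omega) (by omega)]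
      · rw [if_neg h, Int.emod_eq_of_lt (by omega) (by omega)]
    have hq := Int.mul_ediv_add_emod (t : Int) n
    have hr0 : 0 ≤ (t : Int) % n := Int.emod_nonneg _ (by omega)
    have hrn : (t : Int) % n < n := Int.emod_lt_of_pos _ hn
    have hcast : ((t + 1 : Nat) : Int) = (t : Int) + 1 := by push_cast; ring
    have hsucc_mod : ((t : Int) + 1) % n = if (t : Int) % n + 1 = n then 0 else (t : Int) % n + 1 := by
      conv_lhs => rw [show (t : Int) + 1 = ((t : Int) % n + 1) + n * ((t : Int) / n) by omega]
      rw [Int.add_mul_emod_self_left]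
      by_cases h : (t : Int) % n + 1 = n
      · simp [h]
      · rw [if_neg h, Int.emod_eq_of_lt (by omega) (by omega)]
    have hsucc_div : ((t : Int) + 1) / n = if (t : Int) % n + 1 = n then (t : Int) / n + 1 else (t : Int) / n := by
      conv_lhs => rw [show (t : Int) + 1 = ((t : Int) % n + 1) + n * ((t : Int) / n) by omega]
      rw [Int.add_mul_ediv_left _ _ (by omega)]
      by_cases h : (t : Int) % n + 1 = n
      · rw [if_pos h, h, Int.ediv_self (by omega)]; ring
      · rw [if_neg h, Int.ediv_eq_zero_of_lt (by omega) (by omega)]; ring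
    rw [hcast, hshift, hdm1, hsucc_mod, hsucc_div]
    simp only [hcond]
    split_ifs <;> omega

-- ===== VERDICT (by name: the statement is the Claim_ definition above) =====
theorem oneCycle_spec : Claim_equal_oneCycle := by
  intro xs _hdom hpre
  unfold Spec_oneCycle
  match hmax : PySem.List.max? xs (fun x => x) with
  | none => exact absurd ((PySem.List.max?_eq_none_iff xs (fun x => x)).mp hmax) hpre
  | some m =>
    match hidx : PySem.List.index? xs m with
    | none => exact absurd (PySem.List.max?_mem hmax) ((PySem.List.index?_eq_none_iff xs m).mp hidx)
    | some i =>
      obtain ⟨hi, hxi, _⟩ := PySem.List.getElem_of_index?_eq_some hidx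
      have hmx := PySem.List.max?_isMax hmax
      have hn : 0 < xs.length := by
        cases xs with
        | nil => exact absurd rfl hpre
        | cons a l => simp
      simp only [oneCycle, oneCycle_alt, hmax, hidx]
      have hset0 : PySem.List.pySetD xs (i : Int) 0 = xs.set i 0 := by
        rw [PySem.List.pySetD_of_nonneg _ _ (by omega)]; simp
      have hL0len : (xs.set i 0).length = xs.length := by simp
      have hL0ne : xs.set i 0 ≠ [] := by
        intro h; rw [← List.length_eq_zero_iff, hL0len] at h; omega
      rw [hset0]
      apply List.ext_getElem
      · rw [oneCycleLoop_length]
        simp [hL0len]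
      · intro k hk1 hk2
        have hkx : k < xs.length := by rwa [oneCycleLoop_length, hL0len] at hk1
        rw [oneCycleLoop_getElem _ _ _ _ (by rw [hL0len]) hL0ne k (by omega) hk1]
        rw [cntHits_closed _ _ (by exact_mod_cast hn) (by omega) (by exact_mod_cast hkx) _ _]
        rw [List.getElem_map, PySem.List.getElem_enumerate]
        have htn : ((m.toNat : Nat) : Int) = max m 0 := Int.toNat_eq_max m
        rw [htn, List.getElem_set]
        simp only [zero_add]
        by_cases hki : i = k
        · subst hki
          simp
        · rw [if_neg hki, if_neg (show ¬((k : Int) = (i : Int)) by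
            intro h; exact hki (by exact_mod_cast h.symm))]
          ring
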